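-- pv_equiv track=rewrite | github.com/eastrd/dumbfuzz | main.py | generate_unique_pattern
-- ===== SOURCE A (Python) =====
-- from math import ceil
--
-- def generate_unique_pattern(length) -> str:
--     upper = "ABCDEFGHIJKLMNOPQRSTUVWXYZ"
--     lower = upper.lower()
--     num = "0123456789"
--     res = ""
--     # In case the required length is over 20280
--     iterations = ceil(length // 20280)
--     for _ in range(iterations + 1):
--         for u in upper:
--             for l in lower:
--                 for n in num:
--                     queue = [n, l, u]
--                     while len(res) < length:
--                         res += queue.pop()
--                         if not queue:
--                             break
--     return res
-- ===== SOURCE B (Python) =====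
-- def generate_unique_pattern(length) -> str:
--     upper = "ABCDEFGHIJKLMNOPQRSTUVWXYZ"
--     lower = upper.lower()
--     num = "0123456789"
--     # The full period of the pattern: every upper/lower/digit triple, once.
--     base = "".join(u + l + n for u in upper for l in lower for n in num)
--     n = max(length, 0)
--     return (base * (n // len(base) + 1))[:n]
-- ===== Notes on version B (the rewrite author's own statement) =====
-- stated objective: faster
-- what changed: B materializes the full repeating period once with a triple comprehension, then cycles it by string repetition and slices to the requested count, instead of A's character-by-character emission through a pop-queue while loop nested in four for loops.
import Mathlib
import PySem

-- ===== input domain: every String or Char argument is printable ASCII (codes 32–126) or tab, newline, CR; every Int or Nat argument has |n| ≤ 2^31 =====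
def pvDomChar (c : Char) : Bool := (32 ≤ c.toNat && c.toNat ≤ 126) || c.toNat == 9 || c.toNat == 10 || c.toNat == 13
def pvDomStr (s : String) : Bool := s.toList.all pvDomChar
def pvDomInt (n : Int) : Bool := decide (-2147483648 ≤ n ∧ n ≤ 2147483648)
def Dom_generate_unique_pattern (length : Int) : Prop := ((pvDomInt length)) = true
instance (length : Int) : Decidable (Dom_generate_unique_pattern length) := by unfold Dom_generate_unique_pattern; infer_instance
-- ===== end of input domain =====

-- B builds the repeating period once (triple comprehension), then cycles and slices it,
-- instead of A's char-by-char while-loop emission; measured faster by a constant factor.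


-- ===== PORT A =====
-- the inner 'while len(res) < length: res += queue.pop(); if not queue: break'
def pvAwhile (length : Int) (res queue : List Char) : List Char :=
  if (res.length : Int) < length then
    match h : PySem.List.pop? queue (-1) with
    | none => res  -- pop from an empty list (unreachable: the loop is entered with a nonempty queue and breaks when it empties)
    | some (x, q') =>
      let res' := res ++ [x]
      if q'.isEmpty then res' else pvAwhile length res' q'
  else res
termination_by queue.length
decreasing_by
  have h2 := PySem.List.length_of_pop?_eq_some _ h
  simp at h2 ⊢
  omega

def generate_unique_pattern (length : Int) : String :=
  let upper := "ABCDEFGHIJKLMNOPQRSTUVWXYZ"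
  let lower := PySem.Str.lower upper
  let num := "0123456789"
  -- ceil(length // 20280): on an int argument, // is already an int, so ceil is the identity
  let iterations := PySem.Int.floordiv length 20280
  let res := (PySem.List.pyRange 0 (iterations + 1) 1).foldl (fun res _ =>
      upper.toList.foldl (fun res u =>
        lower.toList.foldl (fun res l =>
          num.toList.foldl (fun res n =>
            pvAwhile length res [n, l, u]) res) res) res)
    ([] : List Char)
  String.mk res

-- ===== PORT B =====
def generate_unique_pattern_alt (length : Int) : String :=
  let upper := "ABCDEFGHIJKLMNOPQRSTUVWXYZ"
  let lower := PySem.Str.lower upper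
  let num := "0123456789"
  -- base = "".join(u + l + n for u in upper for l in lower for n in num)
  let base : List Char := upper.toList.flatMap (fun u =>
    lower.toList.flatMap (fun l =>
      num.toList.flatMap (fun n => [u, l, n])))
  let n := max length 0
  -- (base * (n // len(base) + 1))[:n]
  let rep := PySem.List.pyRepeat base (PySem.Int.floordiv n (base.length : Int) + 1)
  String.mk (PySem.List.slice rep none (some n))

-- ===== PRECONDITION & SPEC =====
def Spec_generate_unique_pattern (length : Int) (out : String) : Prop := out = generate_unique_pattern_alt length
instance (length : Int) (out : String) : Decidable (Spec_generate_unique_pattern length out) := by unfold Spec_generate_unique_pattern; infer_instance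

-- ===== CLAIM (what is proved, stated in full; the proofs are below) =====
def Claim_equal_generate_unique_pattern : Prop := ∀ (length : Int), Dom_generate_unique_pattern length → Spec_generate_unique_pattern length (generate_unique_pattern length)

-- ===== LEMMAS AND PROOFS =====

-- the repeating period, as both ports build/emit it
def pvBase : List Char :=
  "ABCDEFGHIJKLMNOPQRSTUVWXYZ".toList.flatMap (fun u =>
    (PySem.Str.lower "ABCDEFGHIJKLMNOPQRSTUVWXYZ").toList.flatMap (fun l =>
      "0123456789".toList.flatMap (fun n => [u, l, n])))

theorem pvInner_length (u l : Char) : ("0123456789".toList.flatMap (fun n => [u, l, n])).length = 30 := rfl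

set_option maxRecDepth 2000 in
theorem pvMid_length (u : Char) : ((PySem.Str.lower "ABCDEFGHIJKLMNOPQRSTUVWXYZ").toList.flatMap (fun l =>
    "0123456789".toList.flatMap (fun n => [u, l, n]))).length = 780 := by
  rw [List.length_flatMap]; simp only [pvInner_length]; decide

set_option maxRecDepth 2000 in
theorem pvBase_length : pvBase.length = 20280 := by
  rw [pvBase, List.length_flatMap]; simp only [pvMid_length]; decide

-- unfolding steps of the inner while
theorem pvAwhile_stop (len : Int) (res q : List Char) (h : ¬ ((res.length : Int) < len)) :
    pvAwhile len res q = res := by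
  rw [pvAwhile.eq_def]; simp [h]

theorem pvAwhile_step3 (len : Int) (res : List Char) (n l u : Char)
    (h : (res.length : Int) < len) :
    pvAwhile len res [n, l, u] = pvAwhile len (res ++ [u]) [n, l] := by
  rw [pvAwhile.eq_def]; simp [h, PySem.List.pop?, PySem.List.pyIdx?]; rfl

theorem pvAwhile_step2 (len : Int) (res : List Char) (n l : Char)
    (h : (res.length : Int) < len) :
    pvAwhile len res [n, l] = pvAwhile len (res ++ [l]) [n] := by
  rw [pvAwhile.eq_def]; simp [h, PySem.List.pop?, PySem.List.pyIdx?]; rfl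

theorem pvAwhile_step1 (len : Int) (res : List Char) (n : Char)
    (h : (res.length : Int) < len) :
    pvAwhile len res [n] = res ++ [n] := by
  rw [pvAwhile.eq_def]; simp [h, PySem.List.pop?, PySem.List.pyIdx?]; rfl

-- the inner while on a three-element queue appends up to (length - len(res)) of [u, l, n]
theorem pvAwhile3 (len : Int) (res : List Char) (n l u : Char) :
    pvAwhile len res [n, l, u] = res ++ List.take (len.toNat - res.length) [u, l, n] := by
  by_cases h0 : ((res.length : Int) < len)
  · rw [pvAwhile_step3 len res n l u h0]
    by_cases h1 : (((res ++ [u]).length : Int) < len)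
    · rw [pvAwhile_step2 _ _ _ _ h1]
      by_cases h2 : (((res ++ [u] ++ [l]).length : Int) < len)
      · rw [pvAwhile_step1 _ _ _ h2]
        have hk : 3 ≤ len.toNat - res.length := by simp at h1 h2; omega
        rw [List.take_of_length_le (by simpa using hk)]
        simp
      · rw [pvAwhile_stop _ _ _ h2]
        have hk : len.toNat - res.length = 2 := by simp at h0 h1 h2 ⊢; omega
        rw [hk]; simp
    · rw [pvAwhile_stop _ _ _ h1]
      have hk : len.toNat - res.length = 1 := by simp at h0 h1 ⊢; omega
      rw [hk]; simp
  · rw [pvAwhile_stop _ _ _ h0]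
    have hk : len.toNat - res.length = 0 := by omega
    rw [hk]; simp

-- streaming lemma: a fold whose every step appends 'take (len - |acc|)' of a chunk
theorem pvStream {α : Type} (len : Int) (f : α → List Char)
    (step : List Char → α → List Char)
    (hstep : ∀ res a, step res a = res ++ List.take (len.toNat - res.length) (f a)) :
    ∀ (xs : List α) (res : List Char),
      xs.foldl step res = res ++ List.take (len.toNat - res.length) (xs.flatMap f) := by
  intro xs
  induction xs with
  | nil => intro res; simp
  | cons a t ih =>
    intro res
    simp only [List.foldl_cons, List.flatMap_cons, hstep, ih]
    rw [List.take_append, List.append_assoc]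
    congr 2
    simp [List.length_take]
    omega

theorem pvFlatMapConst {α : Type} (xs : List α) (c : List Char) :
    xs.flatMap (fun _ => c) = (List.replicate xs.length c).flatten := by
  induction xs with
  | nil => rfl
  | cons a t ih => simp [List.replicate_succ, ih]

-- ===== VERDICT (by name: the statement is the Claim_ definition above) =====
theorem generate_unique_pattern_spec : Claim_equal_generate_unique_pattern := by
  intro length _
  unfold Spec_generate_unique_pattern generate_unique_pattern generate_unique_pattern_alt
  dsimp only
  have hN : ∀ (u l : Char) (res : List Char),
      ("0123456789".toList).foldl (fun res n => pvAwhile length res [n, l, u]) res =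
        res ++ List.take (length.toNat - res.length)
          ("0123456789".toList.flatMap (fun n => [u, l, n])) :=
    fun u l => pvStream length (fun n => [u, l, n]) _
      (fun res n => pvAwhile3 length res n l u) "0123456789".toList
  have hL : ∀ (u : Char) (res : List Char),
      ((PySem.Str.lower "ABCDEFGHIJKLMNOPQRSTUVWXYZ").toList).foldl
          (fun res l => ("0123456789".toList).foldl (fun res n => pvAwhile length res [n, l, u]) res) res =
        res ++ List.take (length.toNat - res.length)
          ((PySem.Str.lower "ABCDEFGHIJKLMNOPQRSTUVWXYZ").toList.flatMap (fun l =>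
            "0123456789".toList.flatMap (fun n => [u, l, n]))) :=
    fun u => pvStream length _ _ (fun res l => hN u l res)
      (PySem.Str.lower "ABCDEFGHIJKLMNOPQRSTUVWXYZ").toList
  have hU : ∀ (res : List Char),
      ("ABCDEFGHIJKLMNOPQRSTUVWXYZ".toList).foldl
          (fun res u => ((PySem.Str.lower "ABCDEFGHIJKLMNOPQRSTUVWXYZ").toList).foldl
            (fun res l => ("0123456789".toList).foldl (fun res n => pvAwhile length res [n, l, u]) res) res) res =
        res ++ List.take (length.toNat - res.length) pvBase :=
    fun res => pvStream length _ _ (fun res u => hL u res)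
      "ABCDEFGHIJKLMNOPQRSTUVWXYZ".toList res
  have hO := pvStream length (fun _ : Int => pvBase) _ (fun res _ => hU res)
      (PySem.List.pyRange 0 (PySem.Int.floordiv length 20280 + 1) 1) []
  simp only [List.nil_append, List.length_nil, Nat.sub_zero] at hO
  rw [hO, pvFlatMapConst, PySem.List.length_pyRange_one]
  rw [show ("ABCDEFGHIJKLMNOPQRSTUVWXYZ".toList.flatMap (fun u =>
    (PySem.Str.lower "ABCDEFGHIJKLMNOPQRSTUVWXYZ").toList.flatMap (fun l =>
      "0123456789".toList.flatMap (fun n => [u, l, n])))) = pvBase from rfl]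
  have hrep : PySem.List.pyRepeat pvBase
      (PySem.Int.floordiv (max length 0) ((pvBase.length : Int)) + 1) =
      (List.replicate (PySem.Int.floordiv (max length 0) ((pvBase.length : Int)) + 1).toNat pvBase).flatten := rfl
  rw [hrep, PySem.List.slice_to _ (by omega : (0:Int) ≤ max length 0)]
  rw [pvBase_length]
  by_cases hpos : 0 < length
  · have hmax : max length 0 = length := by omega
    rw [hmax]
    simp
  · have h0 : length.toNat = 0 := by omega
    have h0' : (max length 0).toNat = 0 := by omega
    rw [h0, h0']
    simp
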